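-- pv_equiv track=rewrite | github.com/iree-org/iree-llvm-sandbox | python/examples/conv/definitions.py | find_contiguous_rank_dims
-- ===== SOURCE A (Python) =====
-- from typing import Any, List, Mapping, Optional, Sequence, Tuple, Union
--
-- RANK_RELATED_DIMS = "DHW"
--
-- def find_contiguous_rank_dims(lst: str) -> Tuple[int, int]:
--   """Returns a the positions of the rank-related dimensions in the list.
--
--   Return a pair of values where the first value is the index of the first
--   rank-related dimension and the second value is the index of the dimension
--   immediately after the last rank-related dimension in the input format string.
--   Expects rank-related dimensions to be contiguous in the format.
--
--   Arguments:
--   lst: convolution format string containing 'D', 'H' and 'W' to indicate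
--     rank-related dimensions.
--   """
--   start, end = None, None
--   for i, char in enumerate(lst):
--     if char in RANK_RELATED_DIMS:
--       if start is None:
--         start = i
--       end = i
--   return start, end + 1
-- ===== SOURCE B (Python) =====
-- RANK_RELATED_DIMS = "DHW"
--
-- def find_contiguous_rank_dims(lst: str):
--   """Span of the rank-related dimensions, via per-character find on the
--   string and on its reverse (no explicit scan over the format string)."""
--   starts = [p for p in (lst.find(c) for c in RANK_RELATED_DIMS) if p >= 0]
--   rev = lst[::-1]
--   rstarts = [p for p in (rev.find(c) for c in RANK_RELATED_DIMS) if p >= 0]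
--   return min(starts), len(lst) - min(rstarts)
-- ===== Notes on version B (the rewrite author's own statement) =====
-- stated objective: alternative
-- what changed: Replaces A's single left-to-right scan tracking start/end with three str.find searches per dimension character on the string and on its reverse, taking the minimum of each; no explicit loop over the format string remains.
-- outside the precondition, e.g. on find_contiguous_rank_dims('NC'): A raises TypeError, B raises ValueError
import Mathlib
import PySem

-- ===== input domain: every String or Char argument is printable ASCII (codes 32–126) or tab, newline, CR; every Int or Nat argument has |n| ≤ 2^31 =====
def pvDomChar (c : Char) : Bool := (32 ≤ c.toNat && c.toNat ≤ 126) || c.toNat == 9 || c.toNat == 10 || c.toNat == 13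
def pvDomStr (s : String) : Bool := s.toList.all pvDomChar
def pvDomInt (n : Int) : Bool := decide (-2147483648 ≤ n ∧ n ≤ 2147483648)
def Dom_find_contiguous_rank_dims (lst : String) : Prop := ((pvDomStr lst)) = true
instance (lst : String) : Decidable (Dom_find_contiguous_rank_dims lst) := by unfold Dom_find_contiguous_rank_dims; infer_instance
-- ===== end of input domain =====

-- B replaces A's single scan tracking first/last rank-dim index with per-character
-- str.find searches on the string and on its reverse, taking the minimum of each
-- (objective: alternative — same linear cost, different primitives and traversal).

-- ===== PORT A =====
-- one step of A's for-loop over (i, char); state = (start, end), both Optional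
def pvStepA (st : Option Int × Option Int) (p : Int × Char) : Option Int × Option Int :=
  if p.2 = 'D' ∨ p.2 = 'H' ∨ p.2 = 'W' then
    ((if st.1 = none then some p.1 else st.1), some p.1)
  else st

def find_contiguous_rank_dims (lst : String) : Int × Int :=
  let fin := (PySem.List.enumerate lst.toList).foldl pvStepA (none, none)
  -- Python does 'return start, end + 1'; when end is None it raises TypeError —
  -- those inputs are excluded by Pre_; the port returns (0, 0) there.
  match fin with
  | (some s, some e) => (s, e + 1)
  | _ => (0, 0)

-- ===== PORT B =====
-- 'lst[::-1]' is the reverse of the string (PySem.Str.slice?_none_none_neg_one);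
-- 'min([])' raises ValueError (min? = none) — excluded by Pre_; (0, 0) returned there.
def find_contiguous_rank_dims_alt (lst : String) : Int × Int :=
  let starts := (['D', 'H', 'W'].map (fun c => PySem.Str.find lst (String.ofList [c]))).filter
    (fun p => 0 ≤ p)
  let rev := String.ofList lst.toList.reverse
  let rstarts := (['D', 'H', 'W'].map (fun c => PySem.Str.find rev (String.ofList [c]))).filter
    (fun p => 0 ≤ p)
  match PySem.List.min? starts (fun x => x) with
  | none => (0, 0)
  | some a =>
    match PySem.List.min? rstarts (fun x => x) with
    | none => (0, 0)
    | some b => (a, (lst.toList.length : Int) - b)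

-- ===== PRECONDITION & SPEC =====
-- Pre_ excludes strings with no rank-related dimension character: there A raises
-- TypeError (None + 1) and B raises ValueError (min of an empty sequence).
def Pre_find_contiguous_rank_dims (lst : String) : Prop :=
  lst.toList.any (fun c => c == 'D' || c == 'H' || c == 'W') = true
instance (lst : String) : Decidable (Pre_find_contiguous_rank_dims lst) := by
  unfold Pre_find_contiguous_rank_dims; infer_instance

def pvWitness_find_contiguous_rank_dims : String := "NCDHW"

def Spec_find_contiguous_rank_dims (lst : String) (out : Int × Int) : Prop := out = find_contiguous_rank_dims_alt lst
instance (lst : String) (out : Int × Int) : Decidable (Spec_find_contiguous_rank_dims lst out) := by unfold Spec_find_contiguous_rank_dims; infer_instance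

-- ===== CLAIM (what is proved, stated in full; the proofs are below) =====
def Claim_equal_find_contiguous_rank_dims : Prop := ∀ (lst : String), Dom_find_contiguous_rank_dims lst → Pre_find_contiguous_rank_dims lst → Spec_find_contiguous_rank_dims lst (find_contiguous_rank_dims lst)

-- ===== LEMMAS AND PROOFS =====

def pvHit (c : Char) : Bool := c == 'D' || c == 'H' || c == 'W'

def pvF (p : Int × Char) : Option Int :=
  if p.2 = 'D' ∨ p.2 = 'H' ∨ p.2 = 'W' then some p.1 else none

-- A's fold computes the head and last of the filtered index list
theorem pvFoldA_char (ps : List (Int × Char)) (s e : Option Int) :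
    ps.foldl pvStepA (s, e) =
      ((match s with | some a => some a | none => (ps.filterMap pvF).head?),
       (if (ps.filterMap pvF).isEmpty then e else (ps.filterMap pvF).getLast?)) := by
  induction ps generalizing s e with
  | nil => cases s <;> simp
  | cons p ps ih =>
    rw [List.foldl_cons, List.filterMap_cons]
    by_cases h : p.2 = 'D' ∨ p.2 = 'H' ∨ p.2 = 'W'
    · rw [show pvStepA (s, e) p = ((if s = none then some p.1 else s), some p.1) from by
        simp [pvStepA, h]]
      rw [ih, show pvF p = some p.1 from by simp [pvF, h]]
      cases s <;> cases hr : ps.filterMap pvF <;> simp_all [List.getLast?_cons]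
    · rw [show pvStepA (s, e) p = (s, e) from by simp [pvStepA, h],
          show pvF p = none from by simp [pvF, h], ih]

theorem pvSingleton_prefix_iff (t : List Char) (c : Char) : [c] <+: t ↔ t.head? = some c := by
  cases t <;> simp [List.cons_prefix_cons, eq_comm]

theorem pvSingleton_infix_of_mem (s : List Char) (c : Char) (h : c ∈ s) : [c] <:+: s := by
  obtain ⟨l, r, rfl⟩ := List.mem_iff_append.mp h
  exact ⟨l, r, by simp⟩

theorem pvFind_single (s : List Char) (c : Char) :
    PySem.Chars.find s [c] =
      match s.findIdx? (· == c) with | some n => (n : Int) | none => -1 := by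
  cases h : s.findIdx? (· == c) with
  | none =>
    have hnm : c ∉ s := by
      intro hc
      have := (List.findIdx?_eq_none_iff.mp h) c hc
      simp at this
    have : ¬ [c] <:+: s := fun hin => hnm (hin.mem (by simp))
    simpa using PySem.Chars.find_eq_neg_one_iff s [c] |>.mpr this
  | some n =>
    obtain ⟨hn, hpn, hmin⟩ := List.findIdx?_eq_some_iff_getElem.mp h
    have hc : c ∈ s := by
      have : s[n] = c := by simpa using hpn
      exact this ▸ List.getElem_mem hn
    have hpos : 0 ≤ PySem.Chars.find s [c] :=
      (PySem.Chars.find_nonneg_iff s [c]).mpr (pvSingleton_infix_of_mem s c hc)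
    obtain ⟨hpre, hfmin⟩ := PySem.Chars.find_spec (s := s) (sub := [c]) hpos
    set k := (PySem.Chars.find s [c]).toNat with hk
    have hsk : s[k]? = some c := by
      have := (pvSingleton_prefix_iff _ c).mp hpre
      simpa [List.head?_drop] using this
    have hklen : k < s.length := (List.getElem?_eq_some_iff.mp hsk).1
    have hskc : s[k] = c := by
      have := List.getElem?_eq_some_iff.mp hsk
      exact this.2
    -- n ≤ k
    have hnk : n ≤ k := by
      by_contra hlt
      exact hmin k (by omega) (by simp [hskc])
    -- k ≤ n
    have hkn : k ≤ n := by
      by_contra hlt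
      apply hfmin n (by omega)
      rw [pvSingleton_prefix_iff, List.head?_drop]
      simp [List.getElem?_eq_getElem hn]
      simpa using hpn
    have : k = n := by omega
    simp only []
    omega

theorem pvF_eq (p : Int × Char) :
    pvF p = if pvHit p.2 then some p.1 else none := by
  by_cases h : p.2 = 'D' ∨ p.2 = 'H' ∨ p.2 = 'W'
  · rcases h with h | h | h <;> simp [pvF, pvHit, h]
  · push Not at h
    simp [pvF, pvHit, h.1, h.2.1, h.2.2]

theorem pvHead_filtered (s : List Char) (k : Int) :
    ((PySem.List.enumerate s k).filterMap pvF).head? =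
      (s.findIdx? pvHit).map (fun n => k + n) := by
  induction s generalizing k with
  | nil => simp [PySem.List.enumerate_nil]
  | cons c t ih =>
    rw [PySem.List.enumerate_cons, List.filterMap_cons, List.findIdx?_cons]
    by_cases h : pvHit c
    · simp [pvF_eq, h]
    · rw [pvF_eq]
      simp only [h, if_false, Bool.false_eq_true, ih]
      cases hf : t.findIdx? pvHit <;> simp [hf] <;> push_cast <;> ring

theorem pvLast_filtered (s : List Char) (k : Int) :
    ((PySem.List.enumerate s k).filterMap pvF).getLast? =
      (s.reverse.findIdx? pvHit).map (fun n => k + s.length - 1 - n) := by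
  induction s using List.reverseRecOn with
  | nil => simp [PySem.List.enumerate_nil]
  | append_singleton t c ih =>
    rw [PySem.List.enumerate_append, List.filterMap_append, List.reverse_append]
    simp only [PySem.List.enumerate_cons, PySem.List.enumerate_nil, List.filterMap_cons,
      List.filterMap_nil, List.reverse_singleton, List.singleton_append, List.findIdx?_cons]
    by_cases h : pvHit c
    · simp [pvF_eq, h, List.getLast?_append, List.length_append]
      omega
    · rw [pvF_eq]
      simp only [h, if_false, Bool.false_eq_true, List.append_nil, ih,
        List.length_append, List.length_singleton]
      cases hf : t.reverse.findIdx? pvHit <;> simp [hf] <;> push_cast <;> ring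

theorem pvMin_finds (s : List Char) :
    PySem.List.min?
      ((['D', 'H', 'W'].map (fun c => PySem.Chars.find s [c])).filter (fun p => 0 ≤ p))
      (fun x => x) =
      (s.findIdx? pvHit).map (fun n => (n : Int)) := by
  cases hf : s.findIdx? pvHit with
  | none =>
    have habs : ∀ c, pvHit c → c ∉ s := by
      intro c hc hm
      have := (List.findIdx?_eq_none_iff.mp hf) c hm
      simp [this] at hc
    have hfind : ∀ c, pvHit c → PySem.Chars.find s [c] = -1 := by
      intro c hc
      rw [pvFind_single]
      have : s.findIdx? (· == c) = none := by
        rw [List.findIdx?_eq_none_iff]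
        intro x hx
        simp only [beq_eq_false_iff_ne, ne_eq]
        rintro rfl
        exact habs x hc hx
      simp [this]
    have hD := hfind 'D' (by decide)
    have hH := hfind 'H' (by decide)
    have hW := hfind 'W' (by decide)
    simp [hD, hH, hW]
  | some n =>
    obtain ⟨hn, hpn, hminn⟩ := List.findIdx?_eq_some_iff_getElem.mp hf
    -- every present find is ≥ n
    have hlb : ∀ y ∈ (['D', 'H', 'W'].map (fun c => PySem.Chars.find s [c])).filter
        (fun p => 0 ≤ p), (n : Int) ≤ y := by
      intro y hy
      obtain ⟨hy0, c, hc, rfl⟩ : (0 ≤ y) ∧ ∃ c, pvHit c ∧ PySem.Chars.find s [c] = y := by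
        simp only [List.mem_filter, List.mem_map, List.mem_cons, decide_eq_true_eq] at hy
        obtain ⟨⟨c, hc, rfl⟩, h0⟩ := hy
        refine ⟨h0, c, ?_, rfl⟩
        rcases hc with rfl | rfl | rfl | h <;> first | decide | simp at h
      rw [pvFind_single] at hy0 ⊢
      cases hm : s.findIdx? (· == c) with
      | none => simp [hm] at hy0
      | some m =>
        obtain ⟨hmlt, hpm, _⟩ := List.findIdx?_eq_some_iff_getElem.mp hm
        have : ¬ m < n := by
          intro hlt
          apply hminn m hlt
          have : s[m] = c := by simpa using hpm
          simp [this, hc]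
        show (n : Int) ≤ (m : Int)
        omega
    -- the find for s[n] is exactly n, and it is in the list
    have hmem : (n : Int) ∈ (['D', 'H', 'W'].map (fun c => PySem.Chars.find s [c])).filter
        (fun p => 0 ≤ p) := by
      have hfind : PySem.Chars.find s [s[n]] = (n : Int) := by
        rw [pvFind_single]
        have : s.findIdx? (· == s[n]) = some n := by
          rw [List.findIdx?_eq_some_iff_getElem]
          refine ⟨hn, by exact beq_self_eq_true s[n], ?_⟩
          intro j hj
          simp only [Bool.not_eq_true, beq_eq_false_iff_ne, ne_eq]
          intro hEq
          exact hminn j hj (by simp [hEq, hpn])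
        simp [this]
      have hcmem : s[n] ∈ ['D', 'H', 'W'] := by
        have := hpn
        simp only [pvHit, Bool.or_eq_true, beq_iff_eq] at this
        rcases this with (h | h) | h <;> simp [h]
      rw [List.mem_filter]
      constructor
      · exact List.mem_map.mpr ⟨s[n], hcmem, hfind⟩
      · simp
    -- min? is some m', and m' = n by antisymmetry
    cases hmin : PySem.List.min?
        ((['D', 'H', 'W'].map (fun c => PySem.Chars.find s [c])).filter (fun p => 0 ≤ p))
        (fun x => x) with
    | none =>
      rw [PySem.List.min?_eq_none_iff] at hmin
      rw [hmin] at hmem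
      simp at hmem
    | some m' =>
      have h1 := PySem.List.min?_mem hmin
      have h2 := PySem.List.min?_isMin hmin _ hmem
      have h3 := hlb m' h1
      have : m' = (n : Int) := by simp at h1 h2 h3 ⊢; omega
      simp [this]

-- ===== VERDICT (by name: the statement is the Claim_ definition above) =====
theorem find_contiguous_rank_dims_spec : Claim_equal_find_contiguous_rank_dims := by
  intro lst _ hpre
  show find_contiguous_rank_dims lst = find_contiguous_rank_dims_alt lst
  have hex : ∀ t : List Char, (∃ c ∈ t, pvHit c) → ∃ n, t.findIdx? pvHit = some n := by
    intro t ⟨c, hc, hcc⟩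
    cases h : t.findIdx? pvHit with
    | none =>
      rw [List.findIdx?_eq_none_iff] at h
      exact absurd (h c hc) (by simp [hcc])
    | some n => exact ⟨n, rfl⟩
  obtain ⟨c, hc, hcc⟩ := List.any_eq_true.mp hpre
  obtain ⟨n0, hf0⟩ := hex lst.toList ⟨c, hc, hcc⟩
  obtain ⟨nL, hfL⟩ := hex lst.toList.reverse ⟨c, List.mem_reverse.mpr hc, hcc⟩
  unfold find_contiguous_rank_dims find_contiguous_rank_dims_alt
  have hhead := pvHead_filtered lst.toList 0
  have hlast := pvLast_filtered lst.toList 0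
  rw [hf0] at hhead
  rw [hfL] at hlast
  have hne : ((PySem.List.enumerate lst.toList 0).filterMap pvF).isEmpty = false := by
    cases hl : (PySem.List.enumerate lst.toList 0).filterMap pvF with
    | nil => rw [hl] at hhead; simp at hhead
    | cons a l => simp
  rw [pvFoldA_char, hhead, hlast, hne]
  simp only [PySem.Str.find_eq, String.toList_ofList, if_false, Bool.false_eq_true]
  rw [pvMin_finds lst.toList, pvMin_finds lst.toList.reverse, hf0, hfL]
  simp only [Option.pure_def, Option.bind_eq_bind, Option.bind_some, Option.map_some,
    Prod.mk.injEq]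
  constructor <;> push_cast <;> ring
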